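-- pv_equiv track=rewrite | github.com/nastyh/LeetCode | Basic Data Structures/2038_remove_colored_pieces_if_both_neighbors_are_the_same_color.py | winnerOfGame
-- ===== SOURCE A (Python) =====
-- def winnerOfGame(colors: str) -> bool:
--     """
--     O(n)
--     O(1)
--     person that wins has more consecutive sequences than another one
--     find a sequence of three
--     check whether it's A or B, increment accordingly
--     compare at the end and return the winner
--     """
--     a, b = 0, 0
--     if len(colors) <= 1:
--          return False
--     for ix in range(1, len(colors) - 1):
--         if colors[ix-1] == colors[ix] == colors[ix+1]:
--             if colors[ix] == 'A':
--                 a += 1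
--             else:
--                 b += 1
--     return a - b >= 1
-- ===== SOURCE B (Python) =====
-- from itertools import groupby
--
-- def winnerOfGame(colors: str) -> bool:
--     a, b = 0, 0
--     for ch, grp in groupby(colors):
--         extra = max(0, sum(1 for _ in grp) - 2)
--         if ch == 'A':
--             a += extra
--         else:
--             b += extra
--     return a > b
-- ===== Notes on version B (the rewrite author's own statement) =====
-- stated objective: simpler
-- what changed: Replaces the sliding three-character window over indices with itertools.groupby: split the string into maximal runs and add max(0, len-2) per run to each player's counter.
import Mathlib
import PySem

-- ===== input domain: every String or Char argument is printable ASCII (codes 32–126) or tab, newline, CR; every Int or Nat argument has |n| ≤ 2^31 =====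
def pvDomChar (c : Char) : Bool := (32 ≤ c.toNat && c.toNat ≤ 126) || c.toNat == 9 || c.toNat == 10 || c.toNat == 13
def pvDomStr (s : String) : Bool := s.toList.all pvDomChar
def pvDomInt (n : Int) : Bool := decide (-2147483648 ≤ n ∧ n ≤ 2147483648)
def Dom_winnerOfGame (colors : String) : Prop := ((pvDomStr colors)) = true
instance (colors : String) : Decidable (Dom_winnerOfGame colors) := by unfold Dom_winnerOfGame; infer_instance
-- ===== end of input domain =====

-- B replaces A's index-based sliding three-character window with a run decomposition
-- (maximal runs of equal characters, max(0, len-2) per run); same O(n) cost, simpler shape.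

-- ===== PORT A =====
-- literal port of A: counters a, b over `for ix in range(1, len-1)`; the indices ix-1, ix,
-- ix+1 are always in range there, so pyGetD's default ' ' is never read.
def winnerOfGame (colors : String) : Bool :=
  let cs := colors.toList
  if PySem.Str.len colors ≤ 1 then false
  else
    let ab := (PySem.List.pyRange 1 (PySem.Str.len colors - 1) 1).foldl
      (fun (ab : Int × Int) ix =>
        if PySem.List.pyGetD cs (ix - 1) ' ' = PySem.List.pyGetD cs ix ' ' ∧ PySem.List.pyGetD cs ix ' ' = PySem.List.pyGetD cs (ix + 1) ' ' then
          if PySem.List.pyGetD cs ix ' ' = 'A' then (ab.1 + 1, ab.2) else (ab.1, ab.2 + 1)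
        else ab) (0, 0)
    decide (ab.1 - ab.2 ≥ 1)

-- ===== PORT B =====
-- itertools.groupby(colors): the list of maximal runs as (character, run length) pairs.
def pvRuns : List Char → List (Char × Nat)
  | [] => []
  | c :: t =>
      (c, 1 + (t.takeWhile (fun y => y == c)).length) :: pvRuns (t.dropWhile (fun y => y == c))
termination_by l => l.length
decreasing_by
  simpa using Nat.lt_succ_of_le (List.length_dropWhile_le _ _)

def winnerOfGame_alt (colors : String) : Bool :=
  let ab := (pvRuns colors.toList).foldl
    (fun (ab : Int × Int) r =>
      let extra : Int := max 0 ((r.2 : Int) - 2)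
      if r.1 = 'A' then (ab.1 + extra, ab.2) else (ab.1, ab.2 + extra)) (0, 0)
  decide (ab.1 > ab.2)

-- ===== PRECONDITION & SPEC =====
def Spec_winnerOfGame (colors : String) (out : Bool) : Prop := out = winnerOfGame_alt colors
instance (colors : String) (out : Bool) : Decidable (Spec_winnerOfGame colors out) := by unfold Spec_winnerOfGame; infer_instance

-- ===== CLAIM (what is proved, stated in full; the proofs are below) =====
def Claim_equal_winnerOfGame : Prop := ∀ (colors : String), Dom_winnerOfGame colors → Spec_winnerOfGame colors (winnerOfGame colors)

-- ===== LEMMAS AND PROOFS =====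

-- all consecutive character triples of a list
def windows3 : List Char → List (Char × Char × Char)
  | x :: y :: z :: r => (x, y, z) :: windows3 (y :: z :: r)
  | _ => []

-- window predicate: the three characters are equal and the middle one satisfies q
def p3 (q : Char → Bool) (t : Char × Char × Char) : Bool :=
  decide (t.1 = t.2.1 ∧ t.2.1 = t.2.2) && q t.2.1

lemma windows3_short (cs : List Char) (h : cs.length ≤ 2) : windows3 cs = [] := by
  match cs, h with
  | [], _ => rfl
  | [_], _ => rfl
  | [_, _], _ => rfl

-- prepending one run character to a list whose head differs adds no equal-triple window
lemma win_one (q : Char → Bool) (x : Char) (r : List Char)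
    (hr : ∀ y, r.head? = some y → y ≠ x) :
    (windows3 (x :: r)).countP (p3 q) = (windows3 r).countP (p3 q) := by
  rcases r with _ | ⟨r0, _ | ⟨r1, rr⟩⟩
  · rfl
  · rfl
  · have h0 : r0 ≠ x := hr r0 rfl
    simp only [windows3, List.countP_cons]
    have : p3 q (x, r0, r1) = false := by
      simp [p3]; intro h; exact absurd h.symm h0
    simp [this]

-- counting q-windows across one maximal run followed by the rest
lemma win_run (q : Char → Bool) (x : Char) :
    ∀ (k : Nat) (r : List Char), (∀ y, r.head? = some y → y ≠ x) →
      (windows3 (List.replicate k x ++ r)).countP (p3 q)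
        = (if q x then k - 2 else 0) + (windows3 r).countP (p3 q) := by
  intro k
  induction k with
  | zero => intro r hr; simp
  | succ k ih =>
    intro r hr
    match k with
    | 0 =>
      simp only [List.replicate_succ, List.replicate_zero, List.nil_append, List.cons_append]
      rw [win_one q x r hr]
      simp
    | 1 =>
      simp only [List.replicate_succ, List.replicate_zero, List.nil_append, List.cons_append]
      rcases r with _ | ⟨r0, rr⟩
      · simp [windows3]
      · have h0 : r0 ≠ x := hr r0 rfl
        show ((x,x,r0) :: windows3 (x :: r0 :: rr)).countP (p3 q) = _
        rw [List.countP_cons]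
        have hp : p3 q (x, x, r0) = false := by
          simp [p3]; intro h; exact absurd h.symm h0
        rw [win_one q x (r0 :: rr) (by intro y hy; cases hy; exact h0)]
        simp [hp]
    | (m+2) =>
      have heq : List.replicate (m+2+1) x ++ r = x :: x :: x :: (List.replicate m x ++ r) := by
        simp [List.replicate_succ]
      rw [heq]
      show ((x,x,x) :: windows3 (x :: x :: (List.replicate m x ++ r))).countP (p3 q) = _
      rw [List.countP_cons]
      have h2 : x :: x :: (List.replicate m x ++ r) = List.replicate (m+2) x ++ r := by
        simp [List.replicate_succ]
      rw [h2, ih r hr]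
      have hp : p3 q (x, x, x) = q x := by simp [p3]
      rw [hp]
      by_cases hq : q x = true
      · simp [hq]; omega
      · simp at hq; simp [hq]

-- A's fold over the window list is the pair of window counts
lemma foldA :
    ∀ (ws : List (Char × Char × Char)) (a b : Int),
      ws.foldl
        (fun (ab : Int × Int) t =>
          if t.1 = t.2.1 ∧ t.2.1 = t.2.2 then
            if t.2.1 = 'A' then (ab.1 + 1, ab.2) else (ab.1, ab.2 + 1)
          else ab) (a, b)
      = (a + (ws.countP (p3 (fun c => c == 'A')) : Int),
         b + (ws.countP (p3 (fun c => !(c == 'A'))) : Int)) := by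
  intro ws
  induction ws with
  | nil => intro a b; simp
  | cons t ws ih =>
    intro a b
    obtain ⟨u, v, w⟩ := t
    simp only [List.foldl_cons, List.countP_cons]
    by_cases h : u = v ∧ v = w
    · obtain ⟨h1, h2⟩ := h
      subst h1; subst h2
      by_cases hA : u = 'A'
      · subst hA; simp [p3, ih]; omega
      · simp [p3, ih, hA]; omega
    · have hp : p3 (fun c => c == 'A') (u, v, w) = false := by
        simp [p3]; intro h1 h2; exact absurd ⟨h1, h2⟩ h
      have hq : p3 (fun c => !(c == 'A')) (u, v, w) = false := by
        simp [p3]; intro h1 h2; exact absurd ⟨h1, h2⟩ h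
      simp only [if_neg h, hp, hq, ih]
      simp

-- the index range of A maps exactly onto the window list
lemma range_windows (cs : List Char) :
    (List.range (cs.length - 2)).map
        (fun k => (cs.getD k ' ', cs.getD (k + 1) ' ', cs.getD (k + 2) ' '))
      = windows3 cs := by
  induction cs using windows3.induct with
  | case1 x y z r ih =>
    have hlen : (x :: y :: z :: r).length - 2 = r.length + 1 := by simp
    rw [hlen, List.range_succ_eq_map, List.map_cons, List.map_map]
    simp only [windows3]
    congr 1
  | case2 cs h =>
    rcases cs with _ | ⟨a, _ | ⟨b, _ | ⟨c, t⟩⟩⟩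
    · rfl
    · rfl
    · rfl
    · exact absurd rfl (h a b c t)

-- B's per-run sums are exactly the window counts
lemma runs_count (q : Char → Bool) :
    ∀ cs : List Char,
      ((pvRuns cs).map (fun r => if q r.1 then max 0 ((r.2 : Int) - 2) else 0)).sum
        = ((windows3 cs).countP (p3 q) : Int) := by
  intro cs
  induction cs using pvRuns.induct with
  | case1 => simp [pvRuns, windows3]
  | case2 c t ih =>
    have htw : t.takeWhile (fun y => y == c)
        = List.replicate (t.takeWhile (fun y => y == c)).length c := by
      rw [List.eq_replicate_iff]
      exact ⟨rfl, fun b hb => by simpa using List.mem_takeWhile_imp hb⟩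
    have hb : ∀ y, (t.dropWhile (fun y => y == c)).head? = some y → y ≠ c := by
      intro y hy
      have hne : t.dropWhile (fun y => y == c) ≠ [] := by
        intro h0; rw [h0] at hy; simp at hy
      have h := List.head_dropWhile_not (fun y => y == c) (l := t) (w := hne)
      rw [List.head?_eq_some_head hne, Option.some.injEq] at hy
      rw [hy] at h
      simpa using h
    have hsplit : c :: t
        = List.replicate ((t.takeWhile (fun y => y == c)).length + 1) c
            ++ t.dropWhile (fun y => y == c) := by
      conv_lhs => rw [← List.takeWhile_append_dropWhile (p := fun y => y == c) (l := t)]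
      rw [List.replicate_succ, List.cons_append]
      congr 2
    rw [pvRuns, List.map_cons, List.sum_cons, ih, hsplit,
        win_run q c ((t.takeWhile (fun y => y == c)).length + 1)
          (t.dropWhile (fun y => y == c)) hb]
    by_cases hq : q c = true
    · simp only [hq, if_true]
      push_cast
      omega
    · simp at hq; simp [hq]

-- B's fold over the runs is the pair of run sums
lemma foldB :
    ∀ (rs : List (Char × Nat)) (a b : Int),
      rs.foldl
        (fun (ab : Int × Int) r =>
          let extra : Int := max 0 ((r.2 : Int) - 2)
          if r.1 = 'A' then (ab.1 + extra, ab.2) else (ab.1, ab.2 + extra)) (a, b)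
      = (a + (rs.map (fun r => if (r.1 == 'A') then max 0 ((r.2 : Int) - 2) else 0)).sum,
         b + (rs.map (fun r => if (!(r.1 == 'A')) then max 0 ((r.2 : Int) - 2) else 0)).sum) := by
  intro rs
  induction rs with
  | nil => intro a b; simp
  | cons r rs ih =>
    intro a b
    obtain ⟨c, n⟩ := r
    simp only [List.foldl_cons, List.map_cons, List.sum_cons]
    by_cases hc : c = 'A'
    · subst hc; simp [ih]; omega
    · simp [ih, hc]; omega

-- both programs reduced to the same pair of window counts
lemma alt_eq (colors : String) :
    winnerOfGame_alt colors
      = decide ((((windows3 colors.toList).countP (p3 (fun c => c == 'A'))) : Int)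
          > (((windows3 colors.toList).countP (p3 (fun c => !(c == 'A')))) : Int)) := by
  unfold winnerOfGame_alt
  rw [foldB]
  simp only [zero_add]
  rw [runs_count (fun c => c == 'A'), runs_count (fun c => !(c == 'A'))]

-- A's fold over the index range, reduced to the pair of window counts
lemma a_fold_eq (cs : List Char) :
    (PySem.List.pyRange 1 ((cs.length : Int) - 1) 1).foldl
      (fun (ab : Int × Int) ix =>
        if PySem.List.pyGetD cs (ix - 1) ' ' = PySem.List.pyGetD cs ix ' ' ∧ PySem.List.pyGetD cs ix ' ' = PySem.List.pyGetD cs (ix + 1) ' ' then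
          if PySem.List.pyGetD cs ix ' ' = 'A' then (ab.1 + 1, ab.2) else (ab.1, ab.2 + 1)
        else ab) (0, 0)
    = (((windows3 cs).countP (p3 (fun c => c == 'A')) : Int),
       ((windows3 cs).countP (p3 (fun c => !(c == 'A'))) : Int)) := by
  have hrange := PySem.List.pyRange_one 1 ((cs.length : Int) - 1)
  rw [show (((cs.length : Int) - 1) - 1).toNat = cs.length - 2 from by omega] at hrange
  rw [hrange, List.foldl_map]
  have hfun : (fun (ab : Int × Int) (k : Nat) =>
      if PySem.List.pyGetD cs (1 + (k : Int) - 1) ' ' = PySem.List.pyGetD cs (1 + (k : Int)) ' '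
          ∧ PySem.List.pyGetD cs (1 + (k : Int)) ' ' = PySem.List.pyGetD cs (1 + (k : Int) + 1) ' ' then
        if PySem.List.pyGetD cs (1 + (k : Int)) ' ' = 'A' then (ab.1 + 1, ab.2) else (ab.1, ab.2 + 1)
      else ab)
    = (fun (ab : Int × Int) (k : Nat) =>
        (fun (ab : Int × Int) (t : Char × Char × Char) =>
          if t.1 = t.2.1 ∧ t.2.1 = t.2.2 then
            if t.2.1 = 'A' then (ab.1 + 1, ab.2) else (ab.1, ab.2 + 1)
          else ab) ab ((fun k => (cs.getD k ' ', cs.getD (k + 1) ' ', cs.getD (k + 2) ' ')) k)) := by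
    funext ab k
    have e0 : (1 : Int) + (k : Int) - 1 = ((k : Nat) : Int) := by ring
    have e2 : (1 : Int) + (k : Int) + 1 = ((k + 2 : Nat) : Int) := by push_cast; ring
    have e1 : (1 : Int) + (k : Int) = ((k + 1 : Nat) : Int) := by push_cast; ring
    rw [e0, e2, e1]
    simp only [PySem.List.pyGetD_natCast, List.getD_eq_getElem?_getD]
  rw [hfun]
  refine Eq.trans (Eq.symm (@List.foldl_map Nat (Char × Char × Char) (Int × Int)
      (fun k => (cs.getD k ' ', cs.getD (k + 1) ' ', cs.getD (k + 2) ' '))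
      (fun ab t =>
        if t.1 = t.2.1 ∧ t.2.1 = t.2.2 then
          if t.2.1 = 'A' then (ab.1 + 1, ab.2) else (ab.1, ab.2 + 1)
        else ab)
      (List.range (cs.length - 2)) ((0 : Int), (0 : Int)))) ?_
  rw [range_windows, foldA]
  simp

-- ===== VERDICT (by name: the statement is the Claim_ definition above) =====
theorem winnerOfGame_spec : Claim_equal_winnerOfGame := by
  intro colors _
  unfold Spec_winnerOfGame
  rw [alt_eq]
  unfold winnerOfGame
  by_cases hn : PySem.Str.len colors ≤ 1
  · rw [if_pos hn]
    rw [PySem.Str.len_eq] at hn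
    rw [windows3_short colors.toList (by omega)]
    simp
  · rw [if_neg hn]
    show decide (_ - _ ≥ 1) = _
    rw [show PySem.Str.len colors = ((colors.toList.length : Int)) from PySem.Str.len_eq colors,
        a_fold_eq colors.toList]
    apply decide_eq_decide.mpr
    omega
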